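-- pv_equiv track=rewrite | github.com/oussama-seme-elayne/google-foobar-challenge | Level 1/The cake is not a lie!/solution.py | solution
-- ===== SOURCE A (Python) =====
-- def sample(leng, split_list):
--     for i in range(0, leng-1):
--
--         if(split_list[i] == split_list[i+1]):
--             if(i == leng-2):
--                 return leng
--             else:
--                 continue
--         else:
--             return 1
--
-- def solution(s):
--     gem_str = s
--     sample_num = 1
--     str_length = len(gem_str)
--     for divider_value in range(1, str_length):
--         split_list = []
--         if(str_length % divider_value == 0):
--             for x in range(0, str_length, divider_value):
--                 split_list.append(gem_str[x:x+divider_value])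
--             split_list_length = len(split_list)
--
--             sample_num = sample(split_list_length, split_list)
--             if(sample_num != 1):
--                 return sample_num
--     return sample_num
-- ===== SOURCE B (Python) =====
-- def solution(s):
--     n = len(s)
--     for p in range(1, n):
--         if s[p] == s[0] and s[p:] == s[:n - p]:
--             return n // p if n % p == 0 else 1
--     return 1
-- ===== Notes on version B (the rewrite author's own statement) =====
-- stated objective: alternative
-- what changed: A enumerates the divisors of n and, for each, splits the string into chunks and compares adjacent chunks; B never enumerates divisors: it scans shifts once for the single smallest period p (first p with s[p]==s[0] and s[p:]==s[:n-p]) and returns n//p if p divides n else 1, correct by the Fine-and-Wilf periodicity argument.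
import Mathlib
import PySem

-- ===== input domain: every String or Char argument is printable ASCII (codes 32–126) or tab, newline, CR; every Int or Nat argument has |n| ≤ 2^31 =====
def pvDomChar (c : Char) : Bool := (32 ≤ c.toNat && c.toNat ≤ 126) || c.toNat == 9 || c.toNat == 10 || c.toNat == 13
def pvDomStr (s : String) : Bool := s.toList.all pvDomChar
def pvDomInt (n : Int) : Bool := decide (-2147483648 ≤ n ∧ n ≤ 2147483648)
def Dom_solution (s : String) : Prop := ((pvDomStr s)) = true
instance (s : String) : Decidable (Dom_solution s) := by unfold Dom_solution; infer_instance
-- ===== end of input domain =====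

-- B abandons A's divisor enumeration with chunk comparisons: it finds the smallest period p
-- (first shift p with s[p] == s[0] and s[p:] == s[:n-p]) and returns n//p if p divides n else 1 (alternative algorithm,
-- correct by the periodicity (Fine–Wilf) argument; similar cost).


-- ===== PORT A =====
-- sample's loop: for i in range(0, leng-1): … ; the [] case is Python's implicit
-- None return, unreachable from solution (there leng = len(split_list) ≥ 2); ported as 1.
def sampleGo (leng : Int) (xs : List (List Char)) : List Int → Int
  | [] => 1
  | i :: rest =>
    if PySem.List.pyGet? xs i = PySem.List.pyGet? xs (i + 1) then
      (if i = leng - 2 then leng else sampleGo leng xs rest)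
    else 1

def sample (leng : Int) (split_list : List (List Char)) : Int :=
  sampleGo leng split_list (PySem.List.pyRange 0 (leng - 1) 1)

-- solution's outer loop over divider_value, carrying sample_num
def solLoop (gem : List Char) (n : Int) : List Int → Int → Int
  | [], acc => acc
  | d :: rest, acc =>
    if PySem.Int.mod n d = 0 then
      let split := (PySem.List.pyRange 0 n d).map
        (fun x => PySem.List.slice gem (some x) (some (x + d)))
      let sn := sample (split.length : Int) split
      if sn ≠ 1 then sn else solLoop gem n rest sn
    else solLoop gem n rest acc

def solution (s : String) : Int :=
  let gem := s.toList
  let n : Int := gem.length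
  solLoop gem n (PySem.List.pyRange 1 n 1) 1

-- ===== PORT B =====
-- for p in range(1, n): if s[p] == s[0] and s[p:] == s[:n-p]: return n//p if n%p==0 else 1
def borderLoop (l : List Char) (n : Int) : List Int → Int
  | [] => 1
  | p :: rest =>
    if PySem.List.pyGet? l p = PySem.List.pyGet? l 0 ∧
        PySem.List.slice l (some p) none = PySem.List.slice l none (some (n - p)) then
      (if PySem.Int.mod n p = 0 then PySem.Int.floordiv n p else 1)
    else borderLoop l n rest

def solution_alt (s : String) : Int :=
  let l := s.toList
  borderLoop l (l.length : Int) (PySem.List.pyRange 1 (l.length : Int) 1)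

-- ===== PRECONDITION & SPEC =====
def Spec_solution (s : String) (out : Int) : Prop := out = solution_alt s
instance (s : String) (out : Int) : Decidable (Spec_solution s out) := by unfold Spec_solution; infer_instance

-- ===== CLAIM (what is proved, stated in full; the proofs are below) =====
def Claim_equal_solution : Prop := ∀ (s : String), Dom_solution s → Spec_solution s (solution s)

-- ===== LEMMAS AND PROOFS =====

-- proof-side helper: A's per-divisor test rewritten as a prefix-repetition check
def strMul (xs : List Char) (k : Int) : List Char := (List.replicate k.toNat xs).flatten

def repLoop (l : List Char) (n : Int) : List Int → Int
  | [] => 1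
  | d :: rest =>
    if PySem.Int.mod n d = 0 ∧
        strMul (PySem.List.slice l none (some d)) (PySem.Int.floordiv n d) = l then
      PySem.Int.floordiv n d
    else repLoop l n rest

-- the chunk list solution builds for a divider d, when l.length = m * d
def chunksOf (l : List Char) (d m : Nat) : List (List Char) :=
  (List.range m).map (fun i => (l.drop (d * i)).take d)

lemma chunksOf_succ (l : List Char) (d m : Nat) :
    chunksOf l d (m + 1) = l.take d :: chunksOf (l.drop d) d m := by
  unfold chunksOf
  rw [List.range_succ_eq_map, List.map_cons, List.map_map]
  refine congrArg₂ _ (by simp) ?_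
  apply List.map_congr_left
  intro k _
  show (l.drop (d * (k + 1))).take d = ((l.drop d).drop (d * k)).take d
  rw [List.drop_drop, show d + d * k = d * (k + 1) by ring]

lemma split_eq (l : List Char) (d m : Nat) (hd : 0 < d) (hl : l.length = m * d) :
    (PySem.List.pyRange 0 (l.length : Int) (d : Int)).map
      (fun x => PySem.List.slice l (some x) (some (x + (d : Int)))) = chunksOf l d m := by
  rw [PySem.List.pyRange_of_pos 0 (l.length : Int) (by exact_mod_cast hd)]
  rcases Nat.eq_zero_or_pos m with hm | hm
  · subst hm
    simp only [Nat.zero_mul] at hl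
    simp [chunksOf, hl]
  · have hlpos : 0 < l.length := by
      have := Nat.mul_le_mul_right d hm
      omega
    have hpos : (0 : Int) < (l.length : Int) := by exact_mod_cast hlpos
    have hcount : (((l.length : Int) - 0 + (d : Int) - 1) / (d : Int)).toNat = m := by
      have h1 : (l.length : Int) - 0 + (d : Int) - 1 = ((d : Int) - 1) + (m : Int) * (d : Int) := by
        rw [hl]; push_cast; ring
      rw [h1, Int.add_mul_ediv_right _ _ (show (d : Int) ≠ 0 by omega),
        Int.ediv_eq_zero_of_lt (by omega) (by omega), zero_add, Int.toNat_natCast]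
    rw [if_pos hpos, hcount, List.map_map]
    unfold chunksOf
    apply List.map_congr_left
    intro k _
    show PySem.List.slice l (some (0 + (d : Int) * (k : Int)))
        (some (0 + (d : Int) * (k : Int) + (d : Int))) = (l.drop (d * k)).take d
    have e1 : (0 : Int) + (d : Int) * (k : Int) = ((d * k : Nat) : Int) := by push_cast; ring
    rw [e1]
    exact PySem.List.slice_natCast_add l (d * k) d

lemma chain_drop (cs : List (List Char)) (j : Nat) (h : j + 1 < cs.length) :
    List.IsChain (· = ·) (cs.drop j) ↔
      cs[j] = cs[j + 1] ∧ List.IsChain (· = ·) (cs.drop (j + 1)) := by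
  have h1 : cs.drop j = cs[j] :: cs.drop (j + 1) := List.drop_eq_getElem_cons (by omega)
  have h2 : cs.drop (j + 1) = cs[j + 1] :: cs.drop (j + 2) := List.drop_eq_getElem_cons h
  rw [h1, h2, List.isChain_cons_cons, ← h2]

lemma sampleGo_spec (cs : List (List Char)) :
    ∀ (k j : Nat), j + 2 + k = cs.length →
      (List.IsChain (· = ·) (cs.drop j) →
        sampleGo (cs.length : Int) cs
          (PySem.List.pyRange (j : Int) ((cs.length : Int) - 1) 1) = (cs.length : Int)) ∧
      (¬ List.IsChain (· = ·) (cs.drop j) →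
        sampleGo (cs.length : Int) cs
          (PySem.List.pyRange (j : Int) ((cs.length : Int) - 1) 1) = 1) := by
  intro k
  induction k with
  | zero =>
    intro j hj
    have hj1 : j + 1 < cs.length := by omega
    have hrange : PySem.List.pyRange (j : Int) ((cs.length : Int) - 1) 1 = [(j : Int)] := by
      rw [show ((cs.length : Int) - 1) = (j : Int) + 1 by omega, PySem.List.pyRange_one_singleton]
    have hget : PySem.List.pyGet? cs ((j : Int)) = some cs[j] := by
      rw [PySem.List.pyGet?_natCast, List.getElem?_eq_getElem (by omega)]
    have hget1 : PySem.List.pyGet? cs ((j : Int) + 1) = some cs[j + 1] := by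
      rw [show ((j : Int) + 1) = ((j + 1 : Nat) : Int) by push_cast; ring,
        PySem.List.pyGet?_natCast, List.getElem?_eq_getElem hj1]
    have hdrop1 : cs.drop (j + 1) = [cs[j + 1]] := by
      rw [List.drop_eq_getElem_cons hj1, List.drop_eq_nil_iff.mpr (by omega)]
    have hcond : ((j : Int)) = (cs.length : Int) - 2 := by omega
    rw [hrange, chain_drop cs j hj1]
    constructor
    · rintro ⟨heq, -⟩
      have hif : PySem.List.pyGet? cs ((j : Int)) = PySem.List.pyGet? cs ((j : Int) + 1) := by
        rw [hget, hget1, heq]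
      simp only [sampleGo, if_pos hif, if_pos hcond]
    · intro hne
      have hne' : ¬ cs[j] = cs[j + 1] := fun h => hne ⟨h, by rw [hdrop1]; simp⟩
      simp [sampleGo, hget, hget1, hne']
  | succ k ih =>
    intro j hj
    have hj1 : j + 1 < cs.length := by omega
    have hjlt : (j : Int) < (cs.length : Int) - 1 := by omega
    have hget : PySem.List.pyGet? cs ((j : Int)) = some cs[j] := by
      rw [PySem.List.pyGet?_natCast, List.getElem?_eq_getElem (by omega)]
    have hget1 : PySem.List.pyGet? cs ((j : Int) + 1) = some cs[j + 1] := by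
      rw [show ((j : Int) + 1) = ((j + 1 : Nat) : Int) by push_cast; ring,
        PySem.List.pyGet?_natCast, List.getElem?_eq_getElem hj1]
    have hIH := ih (j + 1) (by omega)
    push_cast at hIH
    have hcond : ¬ ((j : Int)) = (cs.length : Int) - 2 := by omega
    rw [PySem.List.pyRange_one_cons hjlt, chain_drop cs j hj1]
    constructor
    · rintro ⟨heq, hch⟩
      have hif : PySem.List.pyGet? cs ((j : Int)) = PySem.List.pyGet? cs ((j : Int) + 1) := by
        rw [hget, hget1, heq]
      simp only [sampleGo, if_pos hif, if_neg hcond]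
      exact hIH.1 hch
    · intro hne
      by_cases heq : cs[j] = cs[j + 1]
      · have hch : ¬ List.IsChain (· = ·) (cs.drop (j + 1)) := fun h => hne ⟨heq, h⟩
        have hif : PySem.List.pyGet? cs ((j : Int)) = PySem.List.pyGet? cs ((j : Int) + 1) := by
          rw [hget, hget1, heq]
        simp only [sampleGo, if_pos hif, if_neg hcond]
        exact hIH.2 hch
      · have hif : ¬ PySem.List.pyGet? cs ((j : Int)) = PySem.List.pyGet? cs ((j : Int) + 1) := by
          rw [hget, hget1]
          simpa using heq
        simp only [sampleGo, if_neg hif]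

lemma sample_spec_pos (cs : List (List Char)) (h2 : 2 ≤ cs.length)
    (hch : List.IsChain (· = ·) cs) : sample (cs.length : Int) cs = (cs.length : Int) := by
  have h := (sampleGo_spec cs (cs.length - 2) 0 (by omega)).1
  simpa [sample] using h hch

lemma sample_spec_neg (cs : List (List Char)) (h2 : 2 ≤ cs.length)
    (hch : ¬ List.IsChain (· = ·) cs) : sample (cs.length : Int) cs = 1 := by
  have h := (sampleGo_spec cs (cs.length - 2) 0 (by omega)).2
  simpa [sample] using h hch

lemma chain_chunks (d : Nat) (_hd : 0 < d) :
    ∀ (m : Nat) (l : List Char), l.length = m * d →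
      (List.IsChain (· = ·) (chunksOf l d m) ↔ (List.replicate m (l.take d)).flatten = l) := by
  intro m
  induction m with
  | zero =>
    intro l hl
    have : l = [] := List.eq_nil_of_length_eq_zero (by omega)
    subst this
    simp [chunksOf]
  | succ m ih =>
    intro l hl
    have hle : d ≤ l.length := by
      have : l.length = m * d + d := by rw [hl]; ring
      omega
    have hl' : (l.drop d).length = m * d := by
      have : l.length = m * d + d := by rw [hl]; ring
      simp [List.length_drop]
      omega
    have hsplit : l.take d ++ l.drop d = l := List.take_append_drop d l
    have hflat : (List.replicate (m + 1) (l.take d)).flatten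
        = l.take d ++ (List.replicate m (l.take d)).flatten := by
      rw [List.replicate_succ, List.flatten_cons]
    have hR : ((List.replicate (m + 1) (l.take d)).flatten = l)
        ↔ ((List.replicate m (l.take d)).flatten = l.drop d) := by
      rw [hflat]
      constructor
      · intro h
        exact List.append_cancel_left (h.trans hsplit.symm)
      · intro h
        rw [h, hsplit]
    rw [chunksOf_succ, hR]
    cases m with
    | zero =>
      have hnil : l.drop d = [] := List.eq_nil_of_length_eq_zero (by simpa using hl')
      simp [chunksOf, hnil]
    | succ k =>
      have hdlen : (l.take d).length = d := by
        rw [List.length_take]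
        omega
      have hIH := ih (l.drop d) hl'
      rw [chunksOf_succ, List.isChain_cons_cons, ← chunksOf_succ, hIH]
      constructor
      · rintro ⟨hq, h⟩
        rw [hq]
        exact h
      · intro h
        have hq : l.take d = (l.drop d).take d := by
          rw [← h, List.replicate_succ, List.flatten_cons, List.take_left' hdlen]
        exact ⟨hq, by rw [← hq]; exact h⟩

lemma loop_eq (l : List Char) :
    ∀ ds : List Int, (∀ d ∈ ds, 1 ≤ d ∧ d < (l.length : Int)) →
      solLoop l (l.length : Int) ds 1 = repLoop l (l.length : Int) ds := by
  intro ds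
  induction ds with
  | nil => intro _; simp [solLoop, repLoop]
  | cons d rest ih =>
    intro h
    obtain ⟨hd1, hdlt⟩ := h d (List.mem_cons_self)
    have hrest := ih (fun d' hm => h d' (List.mem_cons_of_mem _ hm))
    by_cases hdvd : PySem.Int.mod (l.length : Int) d = 0
    · obtain ⟨dn, rfl⟩ : ∃ dn : Nat, d = (dn : Int) := ⟨d.toNat, by omega⟩
      have hdn : 0 < dn := by omega
      have hdvdn : dn ∣ l.length := by
        have := (PySem.Int.mod_eq_zero_iff_dvd _ _).mp hdvd
        exact_mod_cast this
      obtain ⟨m0, hm0⟩ := hdvdn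
      have hlen : l.length = m0 * dn := by rw [hm0]; ring
      have hm2 : 2 ≤ m0 := by
        by_contra hc
        have hc1 : m0 ≤ 1 := by omega
        have h1 : l.length ≤ dn := by
          rw [hlen]
          calc m0 * dn ≤ 1 * dn := Nat.mul_le_mul_right dn hc1
            _ = dn := one_mul dn
        have h2 : dn < l.length := by exact_mod_cast hdlt
        omega
      have hsplit := split_eq l dn m0 hdn hlen
      have hlenc : (chunksOf l dn m0).length = m0 := by simp [chunksOf]
      have hfd : PySem.Int.floordiv (l.length : Int) (dn : Int) = (m0 : Int) := by
        rw [hlen, PySem.Int.floordiv_natCast, Nat.mul_div_cancel _ hdn]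
      have hslice : PySem.List.slice l none (some (dn : Int)) = l.take dn := by
        rw [PySem.List.slice_to_natCast]
      have hmul : strMul (l.take dn) ((m0 : Int)) = (List.replicate m0 (l.take dn)).flatten := by
        simp [strMul]
      simp only [solLoop, repLoop, if_pos hdvd, hsplit, hlenc, hslice, hfd, hmul]
      by_cases hrep : (List.replicate m0 (l.take dn)).flatten = l
      · have hch := (chain_chunks dn hdn m0 l hlen).mpr hrep
        have hs := sample_spec_pos (chunksOf l dn m0) (by omega) hch
        rw [hlenc] at hs
        rw [hs, if_pos (show ((m0 : Int)) ≠ 1 by omega), if_pos ⟨hdvd, hrep⟩]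
      · have hch := fun h => hrep ((chain_chunks dn hdn m0 l hlen).mp h)
        have hs := sample_spec_neg (chunksOf l dn m0) (by omega) hch
        rw [hlenc] at hs
        rw [hs, if_neg (show ¬ ((1 : Int)) ≠ 1 by simp), if_neg (fun hc => hrep hc.2)]
        exact hrest
    · simp only [solLoop, repLoop]
      rw [if_neg hdvd, if_neg (fun hc => hdvd hc.1)]
      exact hrest

-- ===== periodicity =====

def IsPer (l : List Char) (p : Nat) : Prop := ∀ i : Nat, i + p < l.length → l[i]? = l[i + p]?

lemma isPer_length (l : List Char) : IsPer l l.length := by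
  intro i hi
  omega

lemma per_drop (l : List Char) (p : Nat) (h : IsPer l p) : IsPer (l.drop p) p := by
  intro i hi
  rw [List.length_drop] at hi
  rw [List.getElem?_drop, List.getElem?_drop]
  have := h (p + i) (by omega)
  rw [show p + i + p = p + (i + p) by omega] at this
  exact this

lemma drop_eq_take_iff (l : List Char) (p : Nat) (hp : p ≤ l.length) :
    l.drop p = l.take (l.length - p) ↔ IsPer l p := by
  rw [List.ext_getElem?_iff]
  constructor
  · intro h i hi
    have := h i
    rw [List.getElem?_drop, List.getElem?_take] at this
    rw [if_pos (by omega)] at this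
    rw [show p + i = i + p by omega] at this
    exact this.symm
  · intro h i
    rw [List.getElem?_drop, List.getElem?_take]
    by_cases hi : i < l.length - p
    · rw [if_pos hi, show p + i = i + p by omega]
      exact (h i (by omega)).symm
    · rw [if_neg hi, List.getElem?_eq_none (by omega)]

lemma per_sub (l : List Char) (p q : Nat) (hpq : p ≤ q) (hN : p + q ≤ l.length)
    (hp : IsPer l p) (hq : IsPer l q) : IsPer l (q - p) := by
  intro i hi
  by_cases hc : i + q < l.length
  · have h1 := hq i hc
    have h2 := hp (i + q - p) (by omega)
    rw [show i + q - p + p = i + q by omega] at h2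
    rw [show i + (q - p) = i + q - p by omega]
    rw [h1, h2]
  · have hpi : p ≤ i := by omega
    have h1 := hp (i - p) (by omega)
    rw [show i - p + p = i by omega] at h1
    have h2 := hq (i - p) (by omega)
    rw [show i - p + q = i + (q - p) by omega] at h2
    rw [← h1, h2]

lemma per_gcd (l : List Char) :
    ∀ s p q, p + q = s → 0 < p → 0 < q → p + q ≤ l.length →
      IsPer l p → IsPer l q → IsPer l (Nat.gcd p q) := by
  intro s
  induction s using Nat.strong_induction_on with
  | _ s ih =>
    intro p q hs hp0 hq0 hN hp hq
    rcases lt_trichotomy p q with hlt | heq | hgt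
    · have hsub : IsPer l (q - p) := per_sub l p q (le_of_lt hlt) hN hp hq
      have := ih q (by omega) p (q - p) (by omega) hp0 (by omega) (by omega) hp hsub
      rwa [Nat.gcd_sub_self_right (le_of_lt hlt)] at this
    · subst heq
      rwa [Nat.gcd_self]
    · have hsub : IsPer l (p - q) := per_sub l q p (le_of_lt hgt) (by omega) hq hp
      have := ih p (by omega) (p - q) q (by omega) (by omega) hq0 (by omega) hsub hq
      rwa [Nat.gcd_sub_self_left (le_of_lt hgt)] at this

lemma rep_of_per (d : Nat) (hd : 0 < d) :
    ∀ (m : Nat) (l : List Char), l.length = (m + 1) * d → IsPer l d →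
      (List.replicate (m + 1) (l.take d)).flatten = l := by
  intro m
  induction m with
  | zero =>
    intro l hl _
    simp [List.take_of_length_le (by omega : l.length ≤ d)]
  | succ m ih =>
    intro l hl hper
    have hdle : d ≤ l.length := by nlinarith
    have hd2 : d + d ≤ l.length := by nlinarith
    have hdrop : l.drop d = l.take (l.length - d) :=
      (drop_eq_take_iff l d hdle).mpr hper
    have htake : (l.drop d).take d = l.take d := by
      rw [hdrop, List.take_take, min_eq_left (by omega)]
    have hlen' : (l.drop d).length = (m + 1) * d := by
      rw [List.length_drop, hl]; ring_nf; omega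
    have hIH := ih (l.drop d) hlen' (per_drop l d hper)
    rw [htake] at hIH
    rw [List.replicate_succ, List.flatten_cons, hIH, List.take_append_drop]

lemma per_of_rep (d m : Nat) (l : List Char) (hl : l.length = (m + 1) * d)
    (h : (List.replicate (m + 1) (l.take d)).flatten = l) : IsPer l d := by
  have hmd : l.length = m * d + d := by rw [hl]; ring
  have hdle : d ≤ l.length := by omega
  have htlen : (l.take d).length = d := by rw [List.length_take]; omega
  rw [← drop_eq_take_iff l d hdle]
  have hdrop : l.drop d = (List.replicate m (l.take d)).flatten := by
    conv_lhs => rw [← h]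
    rw [List.replicate_succ, List.flatten_cons, List.drop_left' htlen]
  have hflen : ((List.replicate m (l.take d)).flatten).length = m * d := by
    rw [List.length_flatten, List.map_replicate, htlen, List.sum_replicate, smul_eq_mul]
  have htake : l.take (l.length - d) = (List.replicate m (l.take d)).flatten := by
    have hsplit : l = (List.replicate m (l.take d)).flatten ++ l.take d := by
      conv_lhs => rw [← h]
      rw [show m + 1 = m + 1 from rfl, List.replicate_succ', List.flatten_append]
      simp
    rw [show l.length - d = m * d by omega]
    conv_lhs => rw [hsplit]
    rw [List.take_left' hflen]
  rw [hdrop, htake]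

lemma rep_iff_per (d m : Nat) (hd : 0 < d) (hm : 0 < m) (l : List Char)
    (hl : l.length = m * d) :
    ((List.replicate m (l.take d)).flatten = l ↔ IsPer l d) := by
  obtain ⟨m', rfl⟩ : ∃ m', m = m' + 1 := ⟨m - 1, by omega⟩
  exact ⟨per_of_rep d m' l hl, rep_of_per d hd m' l hl⟩

-- B's test s[p:] == s[:n-p] is exactly p-periodicity
lemma border_iff_per (l : List Char) (p : Nat) (hp : p ≤ l.length) :
    (PySem.List.slice l (some (p : Int)) none
      = PySem.List.slice l none (some ((l.length : Int) - (p : Int)))) ↔ IsPer l p := by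
  rw [show (l.length : Int) - (p : Int) = ((l.length - p : Nat) : Int) by omega,
    PySem.List.slice_from_natCast, PySem.List.slice_to_natCast]
  exact drop_eq_take_iff l p hp

lemma pyGet_zero_eq (l : List Char) : PySem.List.pyGet? l 0 = l[0]? := by
  rw [show (0 : Int) = ((0 : Nat) : Int) by norm_num, PySem.List.pyGet?_natCast]

-- B's per-shift test (s[p] == s[0] and s[p:] == s[:n-p]) is exactly p-periodicity, for p < n
lemma cond_iff_per (l : List Char) (p : Nat) (hp : p < l.length) :
    (PySem.List.pyGet? l (p : Int) = PySem.List.pyGet? l 0 ∧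
      PySem.List.slice l (some (p : Int)) none
        = PySem.List.slice l none (some ((l.length : Int) - (p : Int)))) ↔ IsPer l p := by
  constructor
  · exact fun hc => (border_iff_per l p (by omega)).mp hc.2
  · intro hper
    refine ⟨?_, (border_iff_per l p (by omega)).mpr hper⟩
    rw [PySem.List.pyGet?_natCast, pyGet_zero_eq]
    have := hper 0 (by omega)
    simpa using this.symm

-- B's loop returns 1 when no shift in [1, n) is a period
lemma borderLoop_none (l : List Char) (hnone : ∀ q, 1 ≤ q → q < l.length → ¬ IsPer l q) :
    ∀ k (j : Nat), 1 ≤ j → j + k = l.length →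
      borderLoop l (l.length : Int) (PySem.List.pyRange (j : Int) (l.length : Int) 1) = 1 := by
  intro k
  induction k with
  | zero =>
    intro j hj1 hj
    rw [show ((l.length : Int)) = (j : Int) by omega]
    simp [borderLoop]
  | succ k ih =>
    intro j hj1 hj
    have hjlt : j < l.length := by omega
    rw [PySem.List.pyRange_one_cons (by omega : (j : Int) < (l.length : Int))]
    rw [borderLoop, if_neg (fun hc => hnone j hj1 hjlt ((cond_iff_per l j hjlt).mp hc))]
    rw [show ((j : Int) + 1) = ((j + 1 : Nat) : Int) by push_cast; ring]
    exact ih (j + 1) (by omega) (by omega)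

-- B's loop: skips every q < p0 (no period), returns at the first period p0 < n
lemma borderLoop_hit (l : List Char) (p0 : Nat) (hp0 : IsPer l p0) (hp0lt : p0 < l.length)
    (hmin : ∀ q, 1 ≤ q → q < p0 → ¬ IsPer l q) :
    ∀ k (j : Nat), 1 ≤ j → j + k = p0 →
      borderLoop l (l.length : Int) (PySem.List.pyRange (j : Int) (l.length : Int) 1)
        = if p0 ∣ l.length then ((l.length / p0 : Nat) : Int) else 1 := by
  intro k
  induction k with
  | zero =>
    intro j hj1 hj
    have hj0 : j = p0 := by omega
    subst hj0
    rw [PySem.List.pyRange_one_cons (by omega : (j : Int) < (l.length : Int))]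
    rw [borderLoop, if_pos ((cond_iff_per l j hp0lt).mpr hp0)]
    by_cases hdvd : j ∣ l.length
    · rw [if_pos ((PySem.Int.mod_eq_zero_iff_dvd _ _).mpr (by exact_mod_cast hdvd)),
        if_pos hdvd, PySem.Int.floordiv_natCast]
    · rw [if_neg (fun hc => hdvd (by exact_mod_cast (PySem.Int.mod_eq_zero_iff_dvd _ _).mp hc)),
        if_neg hdvd]
  | succ k ih =>
    intro j hj1 hj
    have hjlt : j < p0 := by omega
    rw [PySem.List.pyRange_one_cons (by omega : (j : Int) < (l.length : Int))]
    rw [borderLoop,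
      if_neg (fun hc => hmin j hj1 hjlt ((cond_iff_per l j (by omega)).mp hc))]
    have := ih (j + 1) (by omega) (by omega)
    rw [show ((j : Int) + 1) = ((j + 1 : Nat) : Int) by push_cast; ring]
    exact this

-- A's loop (in repLoop form): returns 1 when no proper divisor of n is a period
lemma repLoop_none (l : List Char)
    (hnone : ∀ d : Nat, 1 ≤ d → d < l.length → d ∣ l.length → ¬ IsPer l d) :
    ∀ k (j : Nat), 1 ≤ j → j + k = l.length →
      repLoop l (l.length : Int) (PySem.List.pyRange (j : Int) (l.length : Int) 1) = 1 := by
  intro k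
  induction k with
  | zero =>
    intro j hj1 hj
    rw [show ((l.length : Int)) = (j : Int) by omega]
    simp [repLoop]
  | succ k ih =>
    intro j hj1 hj
    have hjlt : j < l.length := by omega
    rw [PySem.List.pyRange_one_cons (by omega : (j : Int) < (l.length : Int))]
    rw [repLoop]
    rw [if_neg ?_]
    · rw [show ((j : Int) + 1) = ((j + 1 : Nat) : Int) by push_cast; ring]
      exact ih (j + 1) (by omega) (by omega)
    · rintro ⟨hmod, hrep⟩
      have hdvd : j ∣ l.length := by
        exact_mod_cast (PySem.Int.mod_eq_zero_iff_dvd _ _).mp hmod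
      refine hnone j hj1 hjlt hdvd ?_
      rw [PySem.List.slice_to_natCast, PySem.Int.floordiv_natCast] at hrep
      simp only [strMul, Int.toNat_natCast] at hrep
      exact (rep_iff_per j (l.length / j) (by omega)
        (Nat.div_pos (by omega) (by omega)) l (Nat.div_mul_cancel hdvd).symm).mp hrep

-- A's loop: returns n/d0 at the first divisor-period d0
lemma repLoop_hit (l : List Char) (d0 : Nat) (hd0 : IsPer l d0) (hdvd : d0 ∣ l.length)
    (hd0lt : d0 < l.length)
    (hmin : ∀ q, 1 ≤ q → q < d0 → ¬ IsPer l q) :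
    ∀ k (j : Nat), 1 ≤ j → j + k = d0 →
      repLoop l (l.length : Int) (PySem.List.pyRange (j : Int) (l.length : Int) 1)
        = ((l.length / d0 : Nat) : Int) := by
  intro k
  induction k with
  | zero =>
    intro j hj1 hj
    have hj0 : j = d0 := by omega
    subst hj0
    rw [PySem.List.pyRange_one_cons (by omega : (j : Int) < (l.length : Int))]
    rw [repLoop]
    rw [if_pos ?_, PySem.Int.floordiv_natCast]
    refine ⟨(PySem.Int.mod_eq_zero_iff_dvd _ _).mpr (by exact_mod_cast hdvd), ?_⟩
    rw [PySem.List.slice_to_natCast, PySem.Int.floordiv_natCast]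
    simp only [strMul, Int.toNat_natCast]
    exact (rep_iff_per j (l.length / j) (by omega)
      (Nat.div_pos (by omega) (by omega)) l (Nat.div_mul_cancel hdvd).symm).mpr hd0
  | succ k ih =>
    intro j hj1 hj
    have hjlt : j < d0 := by omega
    rw [PySem.List.pyRange_one_cons (by omega : (j : Int) < (l.length : Int))]
    rw [repLoop]
    rw [if_neg ?_]
    · rw [show ((j : Int) + 1) = ((j + 1 : Nat) : Int) by push_cast; ring]
      exact ih (j + 1) (by omega) (by omega)
    · rintro ⟨hmod, hrep⟩
      have hjdvd : j ∣ l.length := by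
        exact_mod_cast (PySem.Int.mod_eq_zero_iff_dvd _ _).mp hmod
      refine hmin j hj1 hjlt ?_
      rw [PySem.List.slice_to_natCast, PySem.Int.floordiv_natCast] at hrep
      simp only [strMul, Int.toNat_natCast] at hrep
      exact (rep_iff_per j (l.length / j) (by omega)
        (Nat.div_pos (by omega) (by omega)) l (Nat.div_mul_cancel hjdvd).symm).mp hrep

-- ===== VERDICT (by name: the statement is the Claim_ definition above) =====
theorem solution_spec : Claim_equal_solution := by
  intro s _
  unfold Spec_solution solution solution_alt
  classical
  set l := s.toList with hl
  rcases Nat.eq_zero_or_pos l.length with hN | hN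
  · simp only [hN]
    norm_num [PySem.List.pyRange_one, solLoop, borderLoop]
  · have hA : solLoop l (l.length : Int) (PySem.List.pyRange 1 (l.length : Int) 1) 1
        = repLoop l (l.length : Int) (PySem.List.pyRange 1 (l.length : Int) 1) := by
      apply loop_eq
      intro d hd
      rw [PySem.List.mem_pyRange_one] at hd
      exact ⟨hd.1, hd.2⟩
    have H : ∃ p, 0 < p ∧ p ≤ l.length ∧ IsPer l p :=
      ⟨l.length, hN, le_refl _, isPer_length l⟩
    set p0 := Nat.find H with hp0def
    obtain ⟨hp0pos, hp0le, hp0per⟩ := Nat.find_spec H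
    have hmin : ∀ q, 1 ≤ q → q < p0 → ¬ IsPer l q := by
      intro q hq1 hqlt hqper
      exact Nat.find_min H hqlt ⟨by omega, by omega, hqper⟩
    rcases Nat.lt_or_ge p0 l.length with hlt | hge
    · have hB := borderLoop_hit l p0 hp0per hlt hmin (p0 - 1) 1 (le_refl _) (by omega)
      rw [show ((1 : Nat) : Int) = (1 : Int) by norm_num] at hB
      rw [hA, hB]
      by_cases hdvd : p0 ∣ l.length
      · have hAv := repLoop_hit l p0 hp0per hdvd hlt hmin (p0 - 1) 1 (le_refl _) (by omega)
        rw [show ((1 : Nat) : Int) = (1 : Int) by norm_num] at hAv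
        rw [hAv, if_pos hdvd]
      · have hAv := repLoop_none l ?_ (l.length - 1) 1 (le_refl _) (by omega)
        · rw [show ((1 : Nat) : Int) = (1 : Int) by norm_num] at hAv
          rw [hAv, if_neg hdvd]
        · intro d hd1 hdlt hddvd hdper
          have hp0d : p0 ≤ d := by
            by_contra hc
            exact hmin d hd1 (by omega) hdper
          obtain ⟨m, hm⟩ := id hddvd
          have hm2 : 2 ≤ m := by
            rcases Nat.lt_or_ge m 2 with h2 | h2
            · interval_cases m <;> omega
            · exact h2
          have h2d : d + d ≤ l.length := by
            rw [hm]
            nlinarith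
          have hgcd : IsPer l (Nat.gcd p0 d) :=
            per_gcd l (p0 + d) p0 d rfl hp0pos (by omega) (by omega) hp0per hdper
          have hgle : Nat.gcd p0 d ≤ p0 := Nat.le_of_dvd hp0pos (Nat.gcd_dvd_left _ _)
          have hgpos : 0 < Nat.gcd p0 d := Nat.gcd_pos_of_pos_left _ hp0pos
          have hgeq : Nat.gcd p0 d = p0 := by
            by_contra hc
            exact hmin _ (by omega) (by omega) hgcd
          exact hdvd (hgeq ▸ ((Nat.gcd_dvd_right p0 d).trans hddvd))
    · have hp0N : p0 = l.length := by omega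
      have hB := borderLoop_none l (fun q hq1 hqlt => hmin q hq1 (by omega))
        (l.length - 1) 1 (le_refl _) (by omega)
      have hAv := repLoop_none l (fun d hd1 hdlt _ hper => hmin d hd1 (by omega) hper)
        (l.length - 1) 1 (le_refl _) (by omega)
      rw [show ((1 : Nat) : Int) = (1 : Int) by norm_num] at hB hAv
      rw [hA, hB, hAv]
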